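-- pv_equiv track=rewrite | github.com/weirdkidsima/penzGTU | security/1.py | find_thesaurus_matches
-- ===== SOURCE A (Python) =====
-- def find_thesaurus_matches(thesaurus, enc_match):
--     """Ищет в тезаурусе строки с одинаковыми символами на заданных позициях"""
--     enc_i, enc_j, pos, enc_char = enc_match
--
--     results = []
--     for t_i in range(len(thesaurus)):
--         for t_j in range(t_i+1, len(thesaurus)):
--             # Проверяем, достаточно ли длинные строки
--             if pos < len(thesaurus[t_i]) and pos < len(thesaurus[t_j]):
--                 if thesaurus[t_i][pos] == thesaurus[t_j][pos]:
--                     # Нашли совпадение в тезаурусе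
--                     results.append((t_i, t_j, pos, thesaurus[t_i][pos]))
--     return results
-- ===== SOURCE B (Python) =====
-- def find_thesaurus_matches(thesaurus, enc_match):
--     """Group string indices by character at pos, then emit matching pairs per index."""
--     if len(thesaurus) < 2:
--         return []
--     pos = enc_match[2]
--     keys = [s[pos] if pos < len(s) else None for s in thesaurus]
--     groups = {}
--     for idx, c in enumerate(keys):
--         if c is not None:
--             groups.setdefault(c, []).append(idx)
--     results = []
--     for idx, c in enumerate(keys):
--         if c is not None:
--             for j in groups[c]:
--                 if j > idx:
--                     results.append((idx, j, pos, c))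
--     return results
-- ===== Notes on version B (the rewrite author's own statement) =====
-- stated objective: faster
-- what changed: Replaces A's all-pairs double loop with a single pass that groups string indices by their character at pos in a dict and then emits, per index, only the later indices in its own group.
import Mathlib
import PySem

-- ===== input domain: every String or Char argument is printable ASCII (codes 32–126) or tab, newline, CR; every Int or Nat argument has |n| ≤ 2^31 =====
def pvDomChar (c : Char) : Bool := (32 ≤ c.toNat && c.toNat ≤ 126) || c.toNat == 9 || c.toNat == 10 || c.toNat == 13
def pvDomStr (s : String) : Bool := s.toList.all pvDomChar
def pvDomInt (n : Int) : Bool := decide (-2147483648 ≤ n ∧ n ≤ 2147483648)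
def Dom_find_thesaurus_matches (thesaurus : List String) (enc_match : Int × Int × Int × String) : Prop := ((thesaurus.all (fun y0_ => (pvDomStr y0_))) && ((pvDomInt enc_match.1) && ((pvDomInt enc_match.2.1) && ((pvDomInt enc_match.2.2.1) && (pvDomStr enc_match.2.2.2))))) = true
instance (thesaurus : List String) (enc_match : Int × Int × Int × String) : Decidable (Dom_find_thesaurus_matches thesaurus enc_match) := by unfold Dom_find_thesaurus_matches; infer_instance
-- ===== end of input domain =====

-- B groups string indices by the character at position pos (one hash pass) instead of
-- A's all-pairs double loop; same return value, no pairwise scan when characters differ.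

-- shared encoding of Python's 1-character string indexing s[pos] (a 1-char str; none = IndexError)
def pvCharStr? (s : String) (i : Int) : Option String :=
  (PySem.Str.pyGet? s i).map (fun c => String.ofList [c])

-- ===== PORT A =====
def find_thesaurus_matches (thesaurus : List String) (enc_match : Int × Int × Int × String) : List (Int × Int × Int × String) :=
  let pos := enc_match.2.2.1
  (PySem.List.pyRange 0 (PySem.List.len thesaurus)).foldl (fun results t_i =>
    (PySem.List.pyRange (t_i + 1) (PySem.List.len thesaurus)).foldl (fun results t_j =>
      if pos < PySem.Str.len (PySem.List.pyGetD thesaurus t_i "") ∧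
         pos < PySem.Str.len (PySem.List.pyGetD thesaurus t_j "") then
        match pvCharStr? (PySem.List.pyGetD thesaurus t_i "") pos,
              pvCharStr? (PySem.List.pyGetD thesaurus t_j "") pos with
        | some ci, some cj => if ci = cj then results ++ [(t_i, t_j, pos, ci)] else results
        | _, _ => results
      else results) results) []

-- ===== PORT B =====
-- the key of one string: s[pos] if pos < len(s) else None
def pvKey (pos : Int) (s : String) : Option String :=
  if pos < PySem.Str.len s then pvCharStr? s pos else none

def find_thesaurus_matches_alt (thesaurus : List String) (enc_match : Int × Int × Int × String) : List (Int × Int × Int × String) :=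
  if PySem.List.len thesaurus < 2 then [] else
  let pos := enc_match.2.2.1
  let keys := thesaurus.map (pvKey pos)
  let groups : PySem.Dict String (List Int) :=
    (PySem.List.enumerate keys).foldl (fun d p =>
      match p.2 with
      | some c => d.insert c (d.getD c [] ++ [p.1])
      | none => d) PySem.Dict.empty
  (PySem.List.enumerate keys).foldl (fun results p =>
    match p.2 with
    | some c => (groups.getD c []).foldl (fun results j =>
        if p.1 < j then results ++ [(p.1, j, pos, c)] else results) results
    | none => results) []

-- ===== PRECONDITION & SPEC =====
-- Pre_ excludes exactly the inputs on which the Python A raises IndexError: a negative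
-- pos with at least two thesaurus entries and some entry shorter than -pos.
def Pre_find_thesaurus_matches (thesaurus : List String) (enc_match : Int × Int × Int × String) : Prop :=
  0 ≤ enc_match.2.2.1 ∨ PySem.List.len thesaurus < 2 ∨
    ∀ s ∈ thesaurus, -enc_match.2.2.1 ≤ PySem.Str.len s
instance (thesaurus : List String) (enc_match : Int × Int × Int × String) : Decidable (Pre_find_thesaurus_matches thesaurus enc_match) := by unfold Pre_find_thesaurus_matches; infer_instance

def pvWitness_find_thesaurus_matches : List String × (Int × Int × Int × String) :=
  (["ab", "cb"], (0, 0, 1, "x"))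

def Spec_find_thesaurus_matches (thesaurus : List String) (enc_match : Int × Int × Int × String) (out : List (Int × Int × Int × String)) : Prop := out = find_thesaurus_matches_alt thesaurus enc_match
instance (thesaurus : List String) (enc_match : Int × Int × Int × String) (out : List (Int × Int × Int × String)) : Decidable (Spec_find_thesaurus_matches thesaurus enc_match out) := by unfold Spec_find_thesaurus_matches; infer_instance

-- ===== CLAIM (what is proved, stated in full; the proofs are below) =====
def Claim_equal_find_thesaurus_matches : Prop := ∀ (thesaurus : List String) (enc_match : Int × Int × Int × String), Dom_find_thesaurus_matches thesaurus enc_match → Pre_find_thesaurus_matches thesaurus enc_match → Spec_find_thesaurus_matches thesaurus enc_match (find_thesaurus_matches thesaurus enc_match)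

-- ===== LEMMAS AND PROOFS =====

-- the key of the i-th string, as both ports compute it
def pvKf (thesaurus : List String) (pos i : Int) : Option String :=
  pvKey pos (PySem.List.pyGetD thesaurus i "")

lemma pvKey_empty (pos : Int) : pvKey pos "" = none := by
  simp [pvKey, pvCharStr?, PySem.Str.pyGet?, PySem.Chars.pyGet?, PySem.List.pyGet?]

-- A's inner-loop body, rewritten through pvKf
lemma pvBodyA_eq (th : List String) (pos t_i t_j : Int) (acc : List (Int × Int × Int × String)) :
    (if pos < PySem.Str.len (PySem.List.pyGetD th t_i "") ∧
        pos < PySem.Str.len (PySem.List.pyGetD th t_j "") then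
      match pvCharStr? (PySem.List.pyGetD th t_i "") pos,
            pvCharStr? (PySem.List.pyGetD th t_j "") pos with
      | some ci, some cj => if ci = cj then acc ++ [(t_i, t_j, pos, ci)] else acc
      | _, _ => acc
    else acc)
    = (if ((pvKf th pos t_i).isSome && (pvKf th pos t_i == pvKf th pos t_j) : Bool) then
        acc ++ [(t_i, t_j, pos, (pvKf th pos t_i).getD "")] else acc) := by
  unfold pvKf pvKey
  cases hci : pvCharStr? (PySem.List.pyGetD th t_i "") pos <;>
    cases hcj : pvCharStr? (PySem.List.pyGetD th t_j "") pos <;>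
      simp [hci, hcj] <;> split_ifs <;> simp_all

-- A as one flatMap over the outer range
def pvG (th : List String) (pos i : Int) : List (Int × Int × Int × String) :=
  ((PySem.List.pyRange (i + 1) (PySem.List.len th)).filter
      (fun j => (pvKf th pos i).isSome && (pvKf th pos i == pvKf th pos j))).map
    (fun j => (i, j, pos, (pvKf th pos i).getD ""))

lemma pvA_eq_flatMap (th : List String) (em : Int × Int × Int × String) :
    find_thesaurus_matches th em
      = (PySem.List.pyRange 0 (PySem.List.len th)).flatMap (pvG th em.2.2.1) := by
  show (PySem.List.pyRange 0 (PySem.List.len th)).foldl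
      (fun results t_i =>
        (PySem.List.pyRange (t_i + 1) (PySem.List.len th)).foldl (fun results t_j =>
          if em.2.2.1 < PySem.Str.len (PySem.List.pyGetD th t_i "") ∧
             em.2.2.1 < PySem.Str.len (PySem.List.pyGetD th t_j "") then
            match pvCharStr? (PySem.List.pyGetD th t_i "") em.2.2.1,
                  pvCharStr? (PySem.List.pyGetD th t_j "") em.2.2.1 with
            | some ci, some cj => if ci = cj then results ++ [(t_i, t_j, em.2.2.1, ci)] else results
            | _, _ => results
          else results) results) []
      = _
  have hinner : ∀ (acc : List (Int × Int × Int × String)) (t_i : Int),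
      ((PySem.List.pyRange (t_i + 1) (PySem.List.len th)).foldl (fun results t_j =>
          if em.2.2.1 < PySem.Str.len (PySem.List.pyGetD th t_i "") ∧
             em.2.2.1 < PySem.Str.len (PySem.List.pyGetD th t_j "") then
            match pvCharStr? (PySem.List.pyGetD th t_i "") em.2.2.1,
                  pvCharStr? (PySem.List.pyGetD th t_j "") em.2.2.1 with
            | some ci, some cj => if ci = cj then results ++ [(t_i, t_j, em.2.2.1, ci)] else results
            | _, _ => results
          else results) acc)
        = acc ++ pvG th em.2.2.1 t_i := by
    intro acc t_i
    rw [PySem.List.foldl_congr_mem _ _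
        (fun acc2 t_j =>
          if ((pvKf th em.2.2.1 t_i).isSome && (pvKf th em.2.2.1 t_i == pvKf th em.2.2.1 t_j) : Bool)
          then acc2 ++ [(t_i, t_j, em.2.2.1, (pvKf th em.2.2.1 t_i).getD "")] else acc2) _
        (fun acc2 t_j _ => pvBodyA_eq th em.2.2.1 t_i t_j acc2),
      PySem.List.foldl_append_if]
    rfl
  rw [PySem.List.foldl_congr_mem _ _
      (fun results t_i => results ++ pvG th em.2.2.1 t_i) _
      (fun acc t_i _ => hinner acc t_i),
    PySem.List.foldl_append_eq_flatMap]
  simp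

-- the dict of groups: getD reads off a filterMap of the processed pairs
lemma pvGroups_getD (l : List (Int × Option String)) (d : PySem.Dict String (List Int)) (c : String) :
    ((l.foldl (fun d p =>
        match p.2 with
        | some c' => d.insert c' (d.getD c' [] ++ [p.1])
        | none => d) d).getD c [])
      = d.getD c [] ++ l.filterMap (fun p => if p.2 = some c then some p.1 else none) := by
  induction l generalizing d with
  | nil => simp
  | cons p l ih =>
    rcases p with ⟨i, o⟩
    cases o with
    | none => simpa using ih d
    | some c' =>
      simp only [List.foldl_cons, List.filterMap_cons]
      rw [ih]
      by_cases hc : c = c'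
      · subst hc
        simp
      · simp [PySem.Dict.getD_insert, hc, Ne.symm hc]

-- B's group dictionary, named for the proofs
def pvGroups (th : List String) (pos : Int) : PySem.Dict String (List Int) :=
  (PySem.List.enumerate (th.map (pvKey pos))).foldl (fun d p =>
    match p.2 with
    | some c => d.insert c (d.getD c [] ++ [p.1])
    | none => d) PySem.Dict.empty

def pvGrp (th : List String) (pos : Int) (c : String) : List Int :=
  (pvGroups th pos).getD c []

-- B's per-entry contribution
def pvH (th : List String) (pos : Int) (p : Int × Option String) : List (Int × Int × Int × String) :=
  match p.2 with
  | some c => ((pvGrp th pos c).filter (fun j => decide (p.1 < j))).map (fun j => (p.1, j, pos, c))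
  | none => []

lemma pvFilterMap_guard {P : Int → Prop} [DecidablePred P] (l : List Int) :
    l.filterMap (fun j => if P j then some j else none) = l.filter (fun j => decide (P j)) := by
  induction l with
  | nil => rfl
  | cons x l ih => by_cases h : P x <;> simp [h, ih]

lemma pvEnum_eq (th : List String) (pos : Int) :
    PySem.List.enumerate (th.map (pvKey pos))
      = (PySem.List.pyRange 0 (PySem.List.len th)).map (fun j => (j, pvKf th pos j)) := by
  rw [PySem.List.enumerate_eq_map_pyRange (th.map (pvKey pos)) none]
  have hlen : PySem.List.len (th.map (pvKey pos)) = PySem.List.len th := by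
    simp [PySem.List.len]
  rw [hlen]
  refine List.map_congr_left ?_
  intro j _
  have h2 : PySem.List.pyGetD (th.map (pvKey pos)) j none = pvKf th pos j := by
    unfold pvKf
    rw [← pvKey_empty pos]
    exact PySem.List.pyGetD_map (pvKey pos) th j ""
  simp [h2]

lemma pvGrp_eq (th : List String) (pos : Int) (c : String) :
    pvGrp th pos c
      = (PySem.List.pyRange 0 (PySem.List.len th)).filter
          (fun j => decide (pvKf th pos j = some c)) := by
  unfold pvGrp pvGroups
  rw [pvGroups_getD, pvEnum_eq, List.filterMap_map]
  have hfn : ((fun p : Int × Option String => if p.2 = some c then some p.1 else none)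
        ∘ (fun j => (j, pvKf th pos j)))
      = fun j => if pvKf th pos j = some c then some j else none := rfl
  rw [hfn, pvFilterMap_guard (P := fun j => pvKf th pos j = some c)]
  simp [PySem.Dict.empty, PySem.Dict.getD, PySem.Dict.get?]

lemma pvG_eq_pvH (th : List String) (pos i : Int) (h0 : 0 ≤ i)
    (hn : i < PySem.List.len th) :
    pvG th pos i = pvH th pos (i, pvKf th pos i) := by
  unfold pvG pvH
  cases hk : pvKf th pos i with
  | none => simp
  | some c =>
    simp only
    rw [pvGrp_eq, List.filter_filter,
      PySem.List.pyRange_one_append 0 (i + 1) (PySem.List.len th) (by omega) (by omega),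
      List.filter_append]
    have h1 : (PySem.List.pyRange 0 (i + 1)).filter
        (fun j => decide (i < j) && decide (pvKf th pos j = some c)) = [] := by
      refine List.filter_eq_nil_iff.mpr ?_
      intro j hj
      rw [PySem.List.mem_pyRange_one] at hj
      simp only [Bool.and_eq_true, decide_eq_true_eq]
      rintro ⟨h, -⟩
      omega
    have h2 : (PySem.List.pyRange (i + 1) (PySem.List.len th)).filter
          (fun j => decide (i < j) && decide (pvKf th pos j = some c))
        = (PySem.List.pyRange (i + 1) (PySem.List.len th)).filter
          (fun j => (some c : Option String).isSome && (some c == pvKf th pos j)) := by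
      refine List.filter_congr ?_
      intro j hj
      rw [PySem.List.mem_pyRange_one] at hj
      have hij : i < j := by omega
      cases hkj : pvKf th pos j <;> simp [hij, eq_comm, Bool.beq_eq_decide_eq]
    rw [h1, h2]
    simp

theorem find_thesaurus_matches_spec : Claim_equal_find_thesaurus_matches := by
  intro th em _ _
  unfold Spec_find_thesaurus_matches
  rw [pvA_eq_flatMap]
  by_cases hn : PySem.List.len th < 2
  · have hB : find_thesaurus_matches_alt th em = [] := by
      unfold find_thesaurus_matches_alt
      rw [if_pos hn]
    rw [hB]
    refine List.flatMap_eq_nil_iff.mpr ?_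
    intro i hi
    rw [PySem.List.mem_pyRange_one] at hi
    unfold pvG
    have hr : PySem.List.pyRange (i + 1) (PySem.List.len th) = [] := by
      refine List.eq_nil_iff_forall_not_mem.mpr ?_
      intro j hj
      rw [PySem.List.mem_pyRange_one] at hj
      omega
    rw [hr]
    simp
  · have hBdef : find_thesaurus_matches_alt th em
        = (PySem.List.enumerate (th.map (pvKey em.2.2.1))).foldl (fun results p =>
            match p.2 with
            | some c => ((pvGroups th em.2.2.1).getD c []).foldl (fun results j =>
                if p.1 < j then results ++ [(p.1, j, em.2.2.1, c)] else results) results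
            | none => results) [] := by
      unfold find_thesaurus_matches_alt pvGroups
      rw [if_neg hn]
    rw [hBdef]
    have hbody : ∀ (results : List (Int × Int × Int × String)) (p : Int × Option String),
        (match p.2 with
          | some c => ((pvGroups th em.2.2.1).getD c []).foldl (fun results j =>
              if p.1 < j then results ++ [(p.1, j, em.2.2.1, c)] else results) results
          | none => results) = results ++ pvH th em.2.2.1 p := by
      intro results p
      cases hp : p.2 with
      | none => simp [pvH, hp]
      | some c =>
        simp only [hp, pvH]
        exact PySem.List.foldl_append_ite (fun j => p.1 < j)
          (fun j => (p.1, j, em.2.2.1, c)) (pvGrp th em.2.2.1 c) results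
    rw [PySem.List.foldl_congr_mem _ _
        (fun results p => results ++ pvH th em.2.2.1 p) _
        (fun results p _ => hbody results p),
      PySem.List.foldl_append_eq_flatMap, pvEnum_eq, List.flatMap_map]
    simp only [List.nil_append]
    have hmap := List.map_congr_left (l := PySem.List.pyRange 0 (PySem.List.len th))
      (f := pvG th em.2.2.1) (g := fun i => pvH th em.2.2.1 (i, pvKf th em.2.2.1 i))
      (fun i hi => by
        rw [PySem.List.mem_pyRange_one] at hi
        exact pvG_eq_pvH th em.2.2.1 i hi.1 hi.2)
    rw [List.flatMap_def, hmap, ← List.flatMap_def]
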